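-- pv_equiv track=rewrite | github.com/EricWebsmith/leetcode_py | archive/lc_0296_best_meeting_point.py | get_dis
-- ===== SOURCE A (Python) =====
-- from typing import List
--
-- def get_dis(arr: List[int]) -> int:
--     n = len(arr)
--     left = 0
--     right = n - 1
--     ans = 0
--     while left < right:
--         ans += arr[right] - arr[left]
--         left += 1
--         right -= 1
--     return ans
-- ===== SOURCE B (Python) =====
-- from typing import List
--
-- def get_dis(arr: List[int]) -> int:
--     n = len(arr)
--
--     def go(lo: int, hi: int) -> int:
--         # sum of arr[n-1-j] - arr[j] over pair indices j in [lo, hi),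
--         # computed by divide and conquer
--         if lo >= hi:
--             return 0
--         if hi - lo == 1:
--             return arr[n - 1 - lo] - arr[lo]
--         mid = (lo + hi) // 2
--         return go(lo, mid) + go(mid, hi)
--
--     return go(0, n // 2)
-- ===== Notes on version B (the rewrite author's own statement) =====
-- stated objective: alternative
-- what changed: Replaced A's linear inward two-pointer while loop with a divide-and-conquer recursion over pair indices: go(lo,hi) splits the index range at its midpoint and a leaf contributes arr[n-1-j]-arr[j].
import Mathlib
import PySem

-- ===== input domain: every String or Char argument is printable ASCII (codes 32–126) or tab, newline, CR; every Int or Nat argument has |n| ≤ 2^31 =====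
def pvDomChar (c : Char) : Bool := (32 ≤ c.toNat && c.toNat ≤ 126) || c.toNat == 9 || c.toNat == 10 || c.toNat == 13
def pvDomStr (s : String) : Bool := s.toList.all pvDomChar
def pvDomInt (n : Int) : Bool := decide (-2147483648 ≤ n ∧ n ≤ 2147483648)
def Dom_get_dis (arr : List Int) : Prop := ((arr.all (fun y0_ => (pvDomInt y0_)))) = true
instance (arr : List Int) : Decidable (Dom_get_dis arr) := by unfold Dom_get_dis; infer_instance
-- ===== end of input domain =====

-- B replaces A's linear inward two-pointer loop with a divide-and-conquer recursion over pair
-- indices (leaf j contributes arr[n-1-j] - arr[j]); objective: alternative structure, same cost.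

-- ===== PORT A =====
-- literal port of A's while loop; arr[right]/arr[left] via pyGet? (in range while left < right)
def get_dis_loop (arr : List Int) (left right ans : Int) : Int :=
  if left < right then
    get_dis_loop arr (left + 1) (right - 1)
      (ans + ((PySem.List.pyGet? arr right).getD 0 - (PySem.List.pyGet? arr left).getD 0))
  else ans
termination_by (right - left).toNat
decreasing_by omega

def get_dis (arr : List Int) : Int :=
  get_dis_loop arr 0 ((arr.length : Int) - 1) 0

-- ===== PORT B =====
-- literal port of Source B's inner go(lo, hi): divide and conquer over pair indices [lo, hi)
def get_dis_go (arr : List Int) (n lo hi : Int) : Int :=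
  if lo ≥ hi then 0
  else if hi - lo = 1 then
    (PySem.List.pyGet? arr (n - 1 - lo)).getD 0 - (PySem.List.pyGet? arr lo).getD 0
  else
    let mid := PySem.Int.floordiv (lo + hi) 2
    get_dis_go arr n lo mid + get_dis_go arr n mid hi
termination_by (hi - lo).toNat
decreasing_by
  · have h := PySem.Int.floordiv_eq_ediv_of_pos (a := lo + hi) (b := 2) (by omega)
    simp only [h]; omega
  · have h := PySem.Int.floordiv_eq_ediv_of_pos (a := lo + hi) (b := 2) (by omega)
    simp only [h]; omega

def get_dis_alt (arr : List Int) : Int :=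
  get_dis_go arr (arr.length : Int) 0 (PySem.Int.floordiv (arr.length : Int) 2)

-- ===== PRECONDITION & SPEC =====
def Spec_get_dis (arr : List Int) (out : Int) : Prop := out = get_dis_alt arr
instance (arr : List Int) (out : Int) : Decidable (Spec_get_dis arr out) := by unfold Spec_get_dis; infer_instance

-- ===== CLAIM (what is proved, stated in full; the proofs are below) =====
def Claim_equal_get_dis : Prop := ∀ (arr : List Int), Dom_get_dis arr → Spec_get_dis arr (get_dis arr)

-- ===== LEMMAS AND PROOFS =====

-- the contribution of pair index j
def pterm (arr : List Int) (j : ℕ) : Int := arr.getD (arr.length - 1 - j) 0 - arr.getD j 0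

theorem pterm_eval (arr : List Int) (j : ℕ) (hj : j < arr.length / 2) :
    (PySem.List.pyGet? arr ((arr.length : Int) - 1 - (j : Int))).getD 0
      - (PySem.List.pyGet? arr ((j : Int))).getD 0 = pterm arr j := by
  have hj1 : j < arr.length := by omega
  have hj2 : arr.length - 1 - j < arr.length := by omega
  have e1 : ((arr.length : Int) - 1 - (j : Int)) = ((arr.length - 1 - j : ℕ) : Int) := by omega
  rw [e1, PySem.List.pyGet?_eq_some_getElem arr (by omega) (by exact_mod_cast hj2),
      PySem.List.pyGet?_eq_some_getElem arr (by omega) (by exact_mod_cast hj1)]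
  simp [pterm, List.getD_eq_getElem?_getD, hj1, hj2]

theorem go_eq_sum (arr : List Int) : ∀ (k : ℕ) (lo hi : Int), (hi - lo).toNat = k →
    0 ≤ lo → hi ≤ ((arr.length / 2 : ℕ) : Int) →
    get_dis_go arr (arr.length : Int) lo hi = ∑ j ∈ Finset.Ico lo.toNat hi.toNat, pterm arr j := by
  intro k
  induction k using Nat.strong_induction_on with
  | _ k ih =>
    intro lo hi hk hlo hhi
    rw [get_dis_go]
    by_cases hge : lo ≥ hi
    · simp only [hge, if_true]
      rw [Finset.Ico_eq_empty (by omega), Finset.sum_empty]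
    · simp only [hge, if_false]
      by_cases h1 : hi - lo = 1
      · simp only [h1, if_true]
        have hjb : lo.toNat < arr.length / 2 := by omega
        have hcast : lo = ((lo.toNat : ℕ) : Int) := by omega
        rw [hcast, pterm_eval arr lo.toNat hjb]
        have : hi.toNat = lo.toNat + 1 := by omega
        rw [this, Finset.sum_Ico_succ_top (by omega)]
        simp
      · simp only [h1, if_false]
        have hfd := PySem.Int.floordiv_eq_ediv_of_pos (a := lo + hi) (b := 2) (by omega)
        set mid := PySem.Int.floordiv (lo + hi) 2 with hmid
        have hb1 : lo < mid := by omega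
        have hb2 : mid < hi := by omega
        rw [ih (mid - lo).toNat (by omega) lo mid rfl (by omega) (by omega),
            ih (hi - mid).toNat (by omega) mid hi rfl (by omega) hhi]
        rw [Finset.sum_Ico_consecutive _ (by omega) (by omega)]

theorem loop_eq_sum (arr : List Int) : ∀ (k : ℕ) (l r ans : Int), (r - l).toNat = k →
    0 ≤ l → l + r = (arr.length : Int) - 1 →
    get_dis_loop arr l r ans = ans + ∑ j ∈ Finset.Ico l.toNat (arr.length / 2), pterm arr j := by
  intro k
  induction k using Nat.strong_induction_on with
  | _ k ih =>
    intro l r ans hk hl hsum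
    rw [get_dis_loop]
    by_cases hlr : l < r
    · simp only [hlr, if_true]
      have hjb : l.toNat < arr.length / 2 := by omega
      have hr : r = (arr.length : Int) - 1 - ((l.toNat : ℕ) : Int) := by omega
      have hlc : l = ((l.toNat : ℕ) : Int) := by omega
      rw [ih (r - 1 - (l + 1)).toNat (by omega) (l + 1) (r - 1) _ rfl (by omega) (by omega)]
      rw [Finset.sum_eq_sum_Ico_succ_bot hjb]
      have hstep : (l + 1).toNat = l.toNat + 1 := by omega
      rw [hstep]
      have : (PySem.List.pyGet? arr r).getD 0 - (PySem.List.pyGet? arr l).getD 0 = pterm arr l.toNat := by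
        rw [hr]; conv_lhs => rw [hlc]
        exact pterm_eval arr l.toNat hjb
      rw [this]; ring
    · simp only [hlr, if_false]
      rw [Finset.Ico_eq_empty (by omega), Finset.sum_empty, add_zero]

-- ===== VERDICT (by name: the statement is the Claim_ definition above) =====
theorem get_dis_spec : Claim_equal_get_dis := by
  intro arr _
  unfold Spec_get_dis get_dis get_dis_alt
  have hfd : PySem.Int.floordiv (arr.length : Int) 2 = ((arr.length / 2 : ℕ) : Int) := by
    exact_mod_cast PySem.Int.floordiv_natCast arr.length 2
  rw [hfd,
      loop_eq_sum arr ((arr.length : Int) - 1 - 0).toNat 0 ((arr.length : Int) - 1) 0 rfl (by omega) (by omega),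
      go_eq_sum arr (((arr.length / 2 : ℕ) : Int) - 0).toNat 0 ((arr.length / 2 : ℕ) : Int) rfl (by omega) (by omega)]
  have hN : (((arr.length : Int)) / 2).toNat = arr.length / 2 := by omega
  simp [hN]
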